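-- pv_equiv track=rewrite | github.com/CAGoff/azure-identity-tracker | identity.py | calculate_risk_categories
-- ===== SOURCE A (Python) =====
-- from typing import List, Dict, Any
--
-- def calculate_risk_categories(spns: List[Dict]) -> Dict[str, int]:
--     """Calculate risk category distribution"""
--     categories = {
--         "low_risk": 0,
--         "medium_risk": 0,
--         "high_risk": 0,
--         "critical_risk": 0
--     }
--
--     for spn in spns:
--         risk_count = len(spn.get("risk_indicators", []))
--
--         if risk_count == 0:
--             categories["low_risk"] += 1
--         elif risk_count <= 2:
--             categories["medium_risk"] += 1
--         elif risk_count <= 4: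
--             categories["high_risk"] += 1
--         else:
--             categories["critical_risk"] += 1
--
--     return categories
-- ===== SOURCE B (Python) =====
-- def calculate_risk_categories(spns):
--     """Calculate risk category distribution"""
--     rcs = [len(spn.get("risk_indicators", [])) for spn in spns]
--     at_most_0 = sum(1 for r in rcs if r <= 0)
--     at_most_2 = sum(1 for r in rcs if r <= 2)
--     at_most_4 = sum(1 for r in rcs if r <= 4)
--     return {
--         "low_risk": at_most_0,
--         "medium_risk": at_most_2 - at_most_0,
--         "high_risk": at_most_4 - at_most_2,
--         "critical_risk": len(rcs) - at_most_4,
--     }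
-- ===== Notes on version B (the rewrite author's own statement) =====
-- stated objective: alternative
-- what changed: Instead of a single pass that classifies each SPN into one bucket and increments a mutated dict, B computes the cumulative distribution of indicator counts at the thresholds 0, 2, 4 in staged counting passes and derives each bucket as a difference of adjacent cumulative counts.
import Mathlib
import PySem

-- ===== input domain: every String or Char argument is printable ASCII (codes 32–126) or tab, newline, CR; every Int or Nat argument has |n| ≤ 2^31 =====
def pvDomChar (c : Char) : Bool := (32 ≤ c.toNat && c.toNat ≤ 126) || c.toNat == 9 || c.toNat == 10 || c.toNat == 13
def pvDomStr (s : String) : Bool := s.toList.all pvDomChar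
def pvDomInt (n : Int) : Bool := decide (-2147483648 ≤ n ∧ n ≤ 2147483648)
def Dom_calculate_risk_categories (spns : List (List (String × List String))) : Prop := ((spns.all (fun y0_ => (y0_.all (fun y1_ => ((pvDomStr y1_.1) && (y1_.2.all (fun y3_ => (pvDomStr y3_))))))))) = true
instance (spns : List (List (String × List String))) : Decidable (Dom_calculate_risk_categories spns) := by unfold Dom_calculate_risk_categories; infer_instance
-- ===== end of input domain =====

-- B replaces A's single classify-and-increment pass over a mutated dict by staged cumulative
-- threshold counts (≤0, ≤2, ≤4) whose differences give the buckets (objective: alternative; same O(n)).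

-- ===== PORT A =====
def calculate_risk_categories (spns : List (List (String × List String))) : List (String × Int) :=
  let categories : PySem.Dict String Int :=
    PySem.Dict.mk [("low_risk", 0), ("medium_risk", 0), ("high_risk", 0), ("critical_risk", 0)]
  (spns.foldl (fun cat spn =>
      let risk_count := ((PySem.Dict.mk spn).getD "risk_indicators" []).length
      if risk_count = 0 then cat.modify "low_risk" 0 (· + 1)
      else if risk_count ≤ 2 then cat.modify "medium_risk" 0 (· + 1)
      else if risk_count ≤ 4 then cat.modify "high_risk" 0 (· + 1)
      else cat.modify "critical_risk" 0 (· + 1)) categories).items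

-- ===== PORT B =====
def calculate_risk_categories_alt (spns : List (List (String × List String))) : List (String × Int) :=
  let rcs : List Nat := spns.map (fun spn => ((PySem.Dict.mk spn).getD "risk_indicators" []).length)
  let at_most_0 : Int := rcs.countP (fun r => r ≤ 0)
  let at_most_2 : Int := rcs.countP (fun r => r ≤ 2)
  let at_most_4 : Int := rcs.countP (fun r => r ≤ 4)
  [("low_risk", at_most_0),
   ("medium_risk", at_most_2 - at_most_0),
   ("high_risk", at_most_4 - at_most_2),
   ("critical_risk", (rcs.length : Int) - at_most_4)]

-- ===== PRECONDITION & SPEC =====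
def Spec_calculate_risk_categories (spns : List (List (String × List String))) (out : List (String × Int)) : Prop := out = calculate_risk_categories_alt spns
instance (spns : List (List (String × List String))) (out : List (String × Int)) : Decidable (Spec_calculate_risk_categories spns out) := by unfold Spec_calculate_risk_categories; infer_instance

-- ===== CLAIM (what is proved, stated in full; the proofs are below) =====
def Claim_equal_calculate_risk_categories : Prop := ∀ (spns : List (List (String × List String))), Dom_calculate_risk_categories spns → Spec_calculate_risk_categories spns (calculate_risk_categories spns)

-- ===== LEMMAS AND PROOFS =====

-- Loop invariant: A's fold from a dict seeded with (a,b,c,d) ends at the seed plus B's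
-- cumulative-count differences over the remaining list.
theorem crc_loop (spns : List (List (String × List String))) :
    ∀ (a b c d : Int),
      (spns.foldl (fun cat spn =>
          if ((PySem.Dict.mk spn).getD "risk_indicators" []).length = 0 then cat.modify "low_risk" 0 (· + 1)
          else if ((PySem.Dict.mk spn).getD "risk_indicators" []).length ≤ 2 then cat.modify "medium_risk" 0 (· + 1)
          else if ((PySem.Dict.mk spn).getD "risk_indicators" []).length ≤ 4 then cat.modify "high_risk" 0 (· + 1)
          else cat.modify "critical_risk" 0 (· + 1))
        (PySem.Dict.mk [("low_risk", a), ("medium_risk", b), ("high_risk", c), ("critical_risk", d)])).items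
      = (let rcs := spns.map (fun spn => ((PySem.Dict.mk spn).getD "risk_indicators" []).length)
         let c0 : Int := rcs.countP (fun r => r ≤ 0)
         let c2 : Int := rcs.countP (fun r => r ≤ 2)
         let c4 : Int := rcs.countP (fun r => r ≤ 4)
         [("low_risk", a + c0),
          ("medium_risk", b + (c2 - c0)),
          ("high_risk", c + (c4 - c2)),
          ("critical_risk", d + ((rcs.length : Int) - c4))]) := by
  induction spns with
  | nil => intro a b c d; simp
  | cons spn rest ih =>
    intro a b c d
    simp only [List.foldl_cons, List.map_cons, List.countP_cons, List.length_cons]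
    generalize ((PySem.Dict.mk spn).getD "risk_indicators" []).length = n
    by_cases h0 : n = 0
    · rw [if_pos h0]
      rw [show (PySem.Dict.mk [("low_risk", a), ("medium_risk", b), ("high_risk", c), ("critical_risk", d)]).modify "low_risk" 0 (· + 1)
            = PySem.Dict.mk [("low_risk", a + 1), ("medium_risk", b), ("high_risk", c), ("critical_risk", d)] from rfl]
      rw [ih (a + 1) b c d]
      simp [show n ≤ 0 from by omega, show n ≤ 2 from by omega, show n ≤ 4 from by omega]
      omega
    · by_cases h2 : n ≤ 2
      · rw [if_neg h0, if_pos h2]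
        rw [show (PySem.Dict.mk [("low_risk", a), ("medium_risk", b), ("high_risk", c), ("critical_risk", d)]).modify "medium_risk" 0 (· + 1)
              = PySem.Dict.mk [("low_risk", a), ("medium_risk", b + 1), ("high_risk", c), ("critical_risk", d)] from rfl]
        rw [ih a (b + 1) c d]
        simp [show ¬ n ≤ 0 from by omega, show n ≤ 2 from h2, show n ≤ 4 from by omega]
        omega
      · by_cases h4 : n ≤ 4
        · rw [if_neg h0, if_neg h2, if_pos h4]
          rw [show (PySem.Dict.mk [("low_risk", a), ("medium_risk", b), ("high_risk", c), ("critical_risk", d)]).modify "high_risk" 0 (· + 1)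
                = PySem.Dict.mk [("low_risk", a), ("medium_risk", b), ("high_risk", c + 1), ("critical_risk", d)] from rfl]
          rw [ih a b (c + 1) d]
          simp [show ¬ n ≤ 0 from by omega, show ¬ n ≤ 2 from h2, show n ≤ 4 from h4]
          omega
        · rw [if_neg h0, if_neg h2, if_neg h4]
          rw [show (PySem.Dict.mk [("low_risk", a), ("medium_risk", b), ("high_risk", c), ("critical_risk", d)]).modify "critical_risk" 0 (· + 1)
                = PySem.Dict.mk [("low_risk", a), ("medium_risk", b), ("high_risk", c), ("critical_risk", d + 1)] from rfl]
          rw [ih a b c (d + 1)]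
          simp [show ¬ n ≤ 0 from by omega, show ¬ n ≤ 2 from h2, show ¬ n ≤ 4 from h4]
          omega

-- ===== VERDICT (by name: the statement is the Claim_ definition above) =====
theorem calculate_risk_categories_spec : Claim_equal_calculate_risk_categories := by
  intro spns _
  unfold Spec_calculate_risk_categories calculate_risk_categories calculate_risk_categories_alt
  rw [crc_loop spns 0 0 0 0]
  norm_num
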